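-- pv_equiv track=rewrite | github.com/bplumber/LeetCode | Day 45/Choose and Swap.py | chooseandswap
-- ===== SOURCE A (Python) =====
-- def chooseandswap (q):
--     st = set()
--     for i in q:
--         st.add(i)
--     st = sorted(list(st))
--     a = []
--     for i in q:
--         a.append(i)
--     for i in a:
--         if i in st:
--             st.remove(i)
--         else:
--             pass
--         if len(st)==0:
--             break
--         x = st[0]
--         if ord(x)<ord(i):
--             for j in range(len(a)):
--                 if a[j]==x:
--                     a[j]=i
--                 elif a[j]==i:
--                     a[j]=x
--             break
--     return ''.join(a)
-- ===== SOURCE B (Python) =====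
-- def chooseandswap(q):
--     order = list(dict.fromkeys(q))
--     n = len(order)
--     # suf[i] = minimum character among order[i+1:], or None if that suffix is empty
--     suf = [None] * n
--     m = None
--     for i in range(n - 1, -1, -1):
--         suf[i] = m
--         if m is None or order[i] < m:
--             m = order[i]
--     for i in range(n):
--         y = order[i]
--         x = suf[i]
--         if x is not None and x < y:
--             return ''.join(x if c == y else y if c == x else c for c in q)
--     return q
-- ===== Notes on version B (the rewrite author's own statement) =====
-- stated objective: alternative
-- what changed: A scans the string while shrinking a sorted set of unseen characters and rescans on a hit; B builds the first-appearance order of distinct characters once, takes a suffix-minimum pass over it, picks the first position whose suffix minimum is smaller, and does one swap pass.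
import Mathlib
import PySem

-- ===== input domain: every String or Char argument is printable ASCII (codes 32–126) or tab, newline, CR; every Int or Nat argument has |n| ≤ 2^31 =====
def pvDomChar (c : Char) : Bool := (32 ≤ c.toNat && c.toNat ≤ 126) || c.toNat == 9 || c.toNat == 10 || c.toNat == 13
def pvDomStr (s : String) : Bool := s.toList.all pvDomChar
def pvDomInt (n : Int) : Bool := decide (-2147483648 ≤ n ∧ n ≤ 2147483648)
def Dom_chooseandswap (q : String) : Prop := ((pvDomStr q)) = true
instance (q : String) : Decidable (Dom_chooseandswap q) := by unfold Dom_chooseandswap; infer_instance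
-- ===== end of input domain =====

-- B replaces A's scan-with-a-shrinking-sorted-set by a first-appearance order list with a
-- suffix-minimum pass (objective: alternative decomposition; same asymptotic cost).

-- ===== PORT A =====
-- the for-loop over a with break; st is the sorted list of not-yet-seen characters
def pvALoop (a : List Char) (st : List Char) : List Char → List Char
  | [] => a
  | i :: rest =>
    match (if i ∈ st then st.erase i else st) with
    | [] => a
    | x :: t =>
      if x.toNat < i.toNat then
        a.map (fun c => if c = x then i else if c = i then x else c)
      else pvALoop a (x :: t) rest

def chooseandswap (q : String) : String :=
  let st := PySem.List.sorted (PySem.Set.ofList q.toList) (fun x => x) false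
  let a := q.toList
  String.ofList (pvALoop a st a)

-- ===== PORT B =====
-- downward loop of Source B: returns (suf, m) where suf[i] = min of order[i+1:] (none if empty)
def pvSuf : List Char → List (Option Char) × Option Char
  | [] => ([], none)
  | y :: rest =>
    let p := pvSuf rest
    (p.2 :: p.1,
      match p.2 with
      | none => some y
      | some m => if y < m then some y else some m)

-- forward scan of Source B: first i with suf[i] < order[i]
def pvFind : List Char → List (Option Char) → Option (Char × Char)
  | y :: ys, s :: ss =>
    (match s with
     | some x => if x < y then some (x, y) else pvFind ys ss
     | none => pvFind ys ss)
  | _, _ => none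

def chooseandswap_alt (q : String) : String :=
  let order := PySem.Set.ofList q.toList
  match pvFind order (pvSuf order).1 with
  | some (x, y) => String.ofList (q.toList.map fun c => if c = y then x else if c = x then y else c)
  | none => q

-- ===== PRECONDITION & SPEC =====
def Spec_chooseandswap (q : String) (out : String) : Prop := out = chooseandswap_alt q
instance (q : String) (out : String) : Decidable (Spec_chooseandswap q out) := by unfold Spec_chooseandswap; infer_instance

-- ===== CLAIM (what is proved, stated in full; the proofs are below) =====
def Claim_equal_chooseandswap : Prop := ∀ (q : String), Dom_chooseandswap q → Spec_chooseandswap q (chooseandswap q)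

-- ===== LEMMAS AND PROOFS =====

-- running minimum, the value pvSuf threads
def pvMin : List Char → Option Char
  | [] => none
  | y :: ys =>
    match pvMin ys with
    | none => some y
    | some m => if y < m then some y else some m

-- common specification of the chosen pair: first y (in first-appearance order) with a
-- strictly smaller character appearing later
def pvSpec : List Char → Option (Char × Char)
  | [] => none
  | y :: ys =>
    match pvMin ys with
    | some x => if x < y then some (x, y) else pvSpec ys
    | none => pvSpec ys

-- first occurrences (in order) of the characters of st along r
def pvE : List Char → List Char → List Char
  | _, [] => []
  | st, i :: rest => if i ∈ st then i :: pvE (st.erase i) rest else pvE st rest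

theorem pvSuf_snd (l : List Char) : (pvSuf l).2 = pvMin l := by
  induction l with
  | nil => rfl
  | cons y ys ih => simp [pvSuf, pvMin, ih]

theorem pvFind_suf (l : List Char) : pvFind l (pvSuf l).1 = pvSpec l := by
  induction l with
  | nil => rfl
  | cons y ys ih =>
    simp only [pvSuf, pvFind, pvSpec, pvSuf_snd]
    cases pvMin ys with
    | none => simpa using ih
    | some m => simp [ih]

theorem pvMin_spec (l : List Char) :
    l = [] ∨ ∃ m, pvMin l = some m ∧ m ∈ l ∧ ∀ c ∈ l, m ≤ c := by
  induction l with
  | nil => exact Or.inl rfl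
  | cons y ys ih =>
    right
    rcases ih with h | ⟨m, hm, hmem, hle⟩
    · subst h; exact ⟨y, rfl, by simp, by simp⟩
    · refine ⟨if y < m then y else m, ?_, ?_, ?_⟩
      · simp only [pvMin, hm]; split_ifs <;> rfl
      · split_ifs <;> simp [hmem]
      · intro c hc
        rcases List.mem_cons.1 hc with rfl | hc
        · split_ifs with h
          · exact le_refl c
          · exact not_lt.1 h
        · split_ifs with h
          · exact (le_of_lt h).trans (hle c hc)
          · exact hle c hc

theorem pvE_nil (r : List Char) : pvE [] r = [] := by
  induction r with
  | nil => rfl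
  | cons i rest ih => simp [pvE, ih]

theorem char_lt_iff_toNat (x i : Char) : x < i ↔ x.toNat < i.toNat := by
  simp only [Char.lt_def, UInt32.lt_iff_toNat_lt, Char.toNat_val]

theorem pvE_mem (r : List Char) : ∀ (st : List Char), st.Nodup → (∀ c ∈ st, c ∈ r) →
    ∀ c : Char, c ∈ pvE st r ↔ c ∈ st := by
  induction r with
  | nil =>
    intro st _ hsub c
    simp only [pvE, List.not_mem_nil, false_iff]
    intro hc; exact absurd (hsub c hc) (List.not_mem_nil)
  | cons i rest ih =>
    intro st hnd hsub c
    by_cases hi : i ∈ st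
    · have hsub1 : ∀ d ∈ st.erase i, d ∈ rest := by
        intro d hd
        rcases hnd.mem_erase_iff.mp hd with ⟨hne, hdst⟩
        rcases List.mem_cons.1 (hsub d hdst) with rfl | h
        · exact absurd rfl hne
        · exact h
      have := ih (st.erase i) (hnd.erase i) hsub1 c
      simp only [pvE, if_pos hi, List.mem_cons, this, hnd.mem_erase_iff]
      constructor
      · rintro (rfl | ⟨_, h⟩) <;> [exact hi; exact h]
      · intro h
        by_cases hci : c = i
        · exact Or.inl hci
        · exact Or.inr ⟨hci, h⟩
    · have hsub1 : ∀ d ∈ st, d ∈ rest := by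
        intro d hd
        rcases List.mem_cons.1 (hsub d hd) with rfl | h
        · exact absurd hd hi
        · exact h
      simpa only [pvE, if_neg hi] using ih st hnd hsub1 c

theorem pvMin_pvE {st r : List Char} (x : Char) (t : List Char)
    (hst : st = x :: t) (hs : st.Pairwise (· < ·)) (hsub : ∀ c ∈ st, c ∈ r) :
    pvMin (pvE st r) = some x := by
  have hnd : st.Nodup := hs.imp (fun h => ne_of_lt h)
  have hmem := pvE_mem r st hnd hsub
  rcases pvMin_spec (pvE st r) with hnil | ⟨m, hm, hmm, hle⟩
  · exfalso
    have : x ∈ pvE st r := (hmem x).mpr (by simp [hst])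
    rw [hnil] at this; exact absurd this (List.not_mem_nil)
  · have hmst : m ∈ st := (hmem m).mp hmm
    have hxm : x ≤ m := by
      rcases List.mem_cons.1 (hst ▸ hmst) with rfl | h
      · exact le_refl m
      · subst hst
        exact le_of_lt ((List.pairwise_cons.mp hs).1 m h)
    have hmx : m ≤ x := hle x ((hmem x).mpr (by simp [hst]))
    rw [hm, le_antisymm hmx hxm]

theorem pvALoop_spec (r : List Char) : ∀ (st a : List Char),
    st.Pairwise (· < ·) →
    (∀ c ∈ st, c ∈ r) →
    (∀ c ∈ r, c ∉ st → ∀ y ∈ st, c ≤ y) →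
    pvALoop a st r =
      (match pvSpec (pvE st r) with
       | some (x, y) => a.map (fun c => if c = y then x else if c = x then y else c)
       | none => a) := by
  induction r with
  | nil => intro st a _ _ _; simp [pvALoop, pvE, pvSpec]
  | cons i rest ih =>
    intro st a hs hsub hJ
    have hnd : st.Nodup := hs.imp (fun h => ne_of_lt h)
    by_cases hi : i ∈ st
    · have hs1 : (st.erase i).Pairwise (· < ·) := List.Pairwise.sublist (List.erase_sublist) hs
      have hsub1 : ∀ c ∈ st.erase i, c ∈ rest := by
        intro c hc
        rcases hnd.mem_erase_iff.mp hc with ⟨hne, hcst⟩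
        rcases List.mem_cons.1 (hsub c hcst) with rfl | h
        · exact absurd rfl hne
        · exact h
      have hEe : pvE st (i :: rest) = i :: pvE (st.erase i) rest := by simp [pvE, hi]
      rw [hEe]
      cases hst1 : st.erase i with
      | nil =>
        have hA : pvALoop a st (i :: rest) = a := by simp [pvALoop, hi, hst1]
        rw [hA, pvE_nil]
        simp [pvSpec, pvMin]
      | cons x t =>
        rw [hst1] at hs1 hsub1
        have hmin : pvMin (pvE (x :: t) rest) = some x :=
          pvMin_pvE x t rfl hs1 hsub1
        by_cases hlt : x < i
        · have hlt' : x.toNat < i.toNat := (char_lt_iff_toNat x i).mp hlt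
          have hA : pvALoop a st (i :: rest) =
              a.map (fun c => if c = x then i else if c = i then x else c) := by
            simp [pvALoop, hi, hst1, hlt']
          rw [hA]
          simp only [pvSpec, hmin, if_pos hlt]
          have hfun : (fun c => if c = x then i else if c = i then x else c) =
              (fun c => if c = i then x else if c = x then i else c) := by
            funext c
            by_cases h1 : c = x
            · subst h1
              rw [if_pos rfl, if_neg (ne_of_lt hlt), if_pos rfl]
            · by_cases h2 : c = i
              · subst h2; rw [if_neg h1, if_pos rfl, if_pos rfl]
              · rw [if_neg h1, if_neg h2, if_neg h2, if_neg h1]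
          rw [hfun]
        · have hge : ¬ x.toNat < i.toNat := fun h => hlt ((char_lt_iff_toNat x i).mpr h)
          have hA : pvALoop a st (i :: rest) = pvALoop a (x :: t) rest := by
            simp [pvALoop, hi, hst1, hge]
          have hJ1 : ∀ c ∈ rest, c ∉ (x :: t) → ∀ y ∈ (x :: t), c ≤ y := by
            intro c hc hcn y hy
            by_cases hci : c = i
            · subst hci
              have hxy : x ≤ y := by
                rcases List.mem_cons.1 hy with rfl | h
                · exact le_refl y
                · exact le_of_lt ((List.pairwise_cons.mp hs1).1 y h)
              exact (not_lt.1 hlt).trans hxy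
            · have hcst : c ∉ st := fun h => hcn (hst1 ▸ hnd.mem_erase_iff.mpr ⟨hci, h⟩)
              exact hJ c (List.mem_cons_of_mem i hc) hcst y (List.mem_of_mem_erase (hst1 ▸ hy))
          rw [hA, ih (x :: t) a hs1 hsub1 hJ1]
          simp only [pvSpec, hmin, if_neg hlt]
    · have hEe : pvE st (i :: rest) = pvE st rest := by simp [pvE, hi]
      rw [hEe]
      have hsub1 : ∀ c ∈ st, c ∈ rest := by
        intro c hc
        rcases List.mem_cons.1 (hsub c hc) with rfl | h
        · exact absurd hc hi
        · exact h
      have hJ1 : ∀ c ∈ rest, c ∉ st → ∀ y ∈ st, c ≤ y := by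
        intro c hc hcn y hy
        exact hJ c (List.mem_cons_of_mem i hc) hcn y hy
      rcases st with _ | ⟨x, t⟩
      · have hA : pvALoop a [] (i :: rest) = a := by simp [pvALoop]
        rw [hA, pvE_nil]
        simp [pvSpec]
      · have hix : i ≤ x := hJ i (List.mem_cons_self) hi x (List.mem_cons_self)
        have hge : ¬ x.toNat < i.toNat := fun h =>
          absurd hix (not_le.2 ((char_lt_iff_toNat x i).mpr h))
        have hA : pvALoop a (x :: t) (i :: rest) = pvALoop a (x :: t) rest := by
          simp [pvALoop, hi, hge]
        rw [hA]
        exact ih (x :: t) a hs hsub1 hJ1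

theorem pvE_filter (r : List Char) : ∀ (st : List Char), st.Nodup → (∀ c ∈ st, c ∈ r) →
    pvE st r = (PySem.Set.ofList r).filter (fun c => decide (c ∈ st)) := by
  induction r with
  | nil => intro st _ _; simp [pvE, PySem.Set.ofList_nil]
  | cons i rest ih =>
    intro st hnd hsub
    rw [PySem.Set.ofList_cons]
    by_cases hi : i ∈ st
    · have hsub1 : ∀ c ∈ st.erase i, c ∈ rest := by
        intro c hc
        rcases hnd.mem_erase_iff.mp hc with ⟨hne, hcst⟩
        rcases List.mem_cons.1 (hsub c hcst) with rfl | h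
        · exact absurd rfl hne
        · exact h
      have hih := ih (st.erase i) (hnd.erase i) hsub1
      simp only [pvE, hih, PySem.Set.discard,
        List.filter_filter, List.filter_cons, decide_eq_true_eq, hi, if_pos]
      congr 1
      apply List.filter_congr
      intro c _
      by_cases hci : c = i
      · subst hci; simp [hnd.mem_erase_iff]
      · simp [hnd.mem_erase_iff, hci]
    · have hsub1 : ∀ c ∈ st, c ∈ rest := by
        intro c hc
        rcases List.mem_cons.1 (hsub c hc) with rfl | h
        · exact absurd hc hi
        · exact h
      simp only [pvE, ih st hnd hsub1, PySem.Set.discard,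
        List.filter_filter, List.filter_cons, decide_eq_true_eq, hi, if_false]
      apply List.filter_congr
      intro c _
      by_cases hci : c = i
      · subst hci; simp [hi]
      · simp [hci]

theorem pvE_full {st r : List Char} (hnd : st.Nodup) (hsub : ∀ c ∈ st, c ∈ r)
    (hall : ∀ c ∈ r, c ∈ st) : pvE st r = PySem.Set.ofList r := by
  rw [pvE_filter r st hnd hsub]
  apply List.filter_eq_self.mpr
  intro c hc
  have hcr : c ∈ r := by simpa using hc
  exact decide_eq_true (hall c hcr)

-- ===== VERDICT (by name: the statement is the Claim_ definition above) =====
theorem chooseandswap_spec : Claim_equal_chooseandswap := by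
  intro q _
  show chooseandswap q = chooseandswap_alt q
  have hs := PySem.List.sorted_ofList_pairwise_lt (xs := q.toList)
  have hmems : ∀ c : Char,
      c ∈ PySem.List.sorted (PySem.Set.ofList q.toList) (fun x => x) false ↔ c ∈ q.toList := by
    intro c
    rw [PySem.List.mem_sorted]
    simp
  have hnd := hs.imp (fun h => ne_of_lt h)
  have hsub : ∀ c ∈ PySem.List.sorted (PySem.Set.ofList q.toList) (fun x => x) false,
      c ∈ q.toList := fun c hc => (hmems c).mp hc
  have hall : ∀ c ∈ q.toList,
      c ∈ PySem.List.sorted (PySem.Set.ofList q.toList) (fun x => x) false :=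
    fun c hc => (hmems c).mpr hc
  have hJ : ∀ c ∈ q.toList,
      c ∉ PySem.List.sorted (PySem.Set.ofList q.toList) (fun x => x) false →
      ∀ y ∈ PySem.List.sorted (PySem.Set.ofList q.toList) (fun x => x) false, c ≤ y := by
    intro c hc hcn
    exact absurd (hall c hc) hcn
  have key := pvALoop_spec q.toList _ q.toList hs hsub hJ
  rw [pvE_full hnd hsub hall] at key
  have ha : chooseandswap q = String.ofList
      (pvALoop q.toList (PySem.List.sorted (PySem.Set.ofList q.toList) (fun x => x) false)
        q.toList) := rfl
  have hb : chooseandswap_alt q =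
      (match pvFind (PySem.Set.ofList q.toList) (pvSuf (PySem.Set.ofList q.toList)).1 with
       | some (x, y) =>
           String.ofList (q.toList.map fun c => if c = y then x else if c = x then y else c)
       | none => q) := rfl
  rw [ha, hb, key, ← pvFind_suf (PySem.Set.ofList q.toList)]
  cases hf : pvFind (PySem.Set.ofList q.toList) (pvSuf (PySem.Set.ofList q.toList)).1 with
  | none => simp
  | some p => obtain ⟨x, y⟩ := p; rfl
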